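-- pv_equiv track=rewrite | github.com/JethroLong/COMP90024-Cluster-and-Cloud-Computing | Assignment 1/src/Test.py | resolve_tie
-- ===== SOURCE A (Python) =====
-- def resolve_tie(sorted_dict_obj):
--     top5_dict = {}
--     longest_tie = -1
--     for k, v in sorted_dict_obj.items():
--         next_most = v[0][1]  # occurrences of seq[0] --a hashtag
--         tie_list = []
--         top_count = 0
--         top5_dict[k] = []
--         for seq in v:
--             if seq[1] == next_most:
--                 tie_list.append(seq)
--             else:
--                 if top_count < 5:
--                     next_most = seq[1]
--                     longest_tie = max(longest_tie, len(tie_list))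
--                     top5_dict[k].append(tie_list)
--                     top_count += 1
--                 else:
--                     break
--                 tie_list = []
--                 tie_list.append(seq)
--     return top5_dict, longest_tie
-- ===== SOURCE B (Python) =====
-- def resolve_tie(sorted_dict_obj):
--     top5_dict = {}
--     longest_tie = -1
--     for k, v in sorted_dict_obj.items():
--         # boundary indices: positions where a new count value starts
--         cuts = [i for i in range(len(v)) if i == 0 or v[i][1] != v[i - 1][1]]
--         m = min(5, len(cuts) - 1)
--         top5_dict[k] = [v[cuts[j]:cuts[j + 1]] for j in range(m)]
--         longest_tie = max([longest_tie] + [cuts[j + 1] - cuts[j] for j in range(m)])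
--     return top5_dict, longest_tie
-- ===== Notes on version B (the rewrite author's own statement) =====
-- stated objective: alternative
-- what changed: Instead of A's sequential state machine (next_most/tie_list/top_count with break) that accumulates tie groups element by element, B computes the boundary indices where the count changes by an index filter and then materialises each kept group as a slice v[cuts[j]:cuts[j+1]], taking min(5, len(cuts)-1) inter-cut slices and the max of index gaps.
-- outside the precondition, e.g. on resolve_tie({'a': []}): A raises IndexError, B returns ({'a': []}, -1)
import Mathlib
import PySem

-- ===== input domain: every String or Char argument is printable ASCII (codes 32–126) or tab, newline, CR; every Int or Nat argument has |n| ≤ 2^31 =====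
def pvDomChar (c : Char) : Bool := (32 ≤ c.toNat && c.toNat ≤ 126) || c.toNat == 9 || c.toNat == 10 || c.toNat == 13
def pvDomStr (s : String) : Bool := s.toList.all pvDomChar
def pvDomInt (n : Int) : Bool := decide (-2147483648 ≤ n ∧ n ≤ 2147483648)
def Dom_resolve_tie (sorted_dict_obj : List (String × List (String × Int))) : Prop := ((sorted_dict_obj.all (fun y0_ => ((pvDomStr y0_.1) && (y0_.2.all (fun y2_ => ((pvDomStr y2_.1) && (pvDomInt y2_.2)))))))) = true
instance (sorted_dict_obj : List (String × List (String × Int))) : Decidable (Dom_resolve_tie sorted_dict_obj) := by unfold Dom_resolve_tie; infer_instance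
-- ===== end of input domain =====

-- B replaces A's sequential tie_list/top_count state machine by computing the boundary
-- indices where the count changes and slicing the kept groups out of v (objective:
-- alternative decomposition; same asymptotic cost).

-- ===== PORT A =====
-- inner 'for seq in v' loop of A: state (next_most, tie_list, top_count, top5_dict, longest_tie);
-- the 'break' is the final non-recursive branch
def pvInnerA (k : String) :
    List (String × Int) → Int → List (String × Int) → Int →
    PySem.Dict String (List (List (String × Int))) → Int →
    PySem.Dict String (List (List (String × Int))) × Int
  | [], _, _, _, d, lg => (d, lg)
  | seq :: rest, next_most, tie_list, top_count, d, lg =>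
    if seq.2 == next_most then
      pvInnerA k rest next_most (tie_list ++ [seq]) top_count d lg
    else if top_count < 5 then
      pvInnerA k rest seq.2 [seq] (top_count + 1)
        (d.modify k [] (· ++ [tie_list])) (max lg (tie_list.length : Int))
    else (d, lg)

def resolve_tie (sorted_dict_obj : List (String × List (String × Int))) : (List (String × List (List (String × Int)))) × Int :=
  let r := sorted_dict_obj.foldl
    (fun (acc : PySem.Dict String (List (List (String × Int))) × Int) kv =>
      match PySem.List.pyGet? kv.2 0 with   -- v[0][1]: none = IndexError, excluded by Pre_
      | none => acc
      | some first =>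
        pvInnerA kv.1 kv.2 first.2 [] 0 (acc.1.insert kv.1 []) acc.2)
    (PySem.Dict.empty, -1)
  (r.1.items, r.2)

-- ===== PORT B =====
-- predicate of Source B's comprehension: 'i == 0 or v[i][1] != v[i - 1][1]'
def pvBnd (v : List (String × Int)) (i : Int) : Bool :=
  i == 0 || ((PySem.List.pyGetD v i ("", 0)).2 != (PySem.List.pyGetD v (i - 1) ("", 0)).2)

-- cuts = [i for i in range(len(v)) if i == 0 or v[i][1] != v[i - 1][1]]
def pvCutsB (v : List (String × Int)) : List Int :=
  (PySem.List.pyRange 0 (v.length : Int) 1).filter (pvBnd v)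

def resolve_tie_alt (sorted_dict_obj : List (String × List (String × Int))) : (List (String × List (List (String × Int)))) × Int :=
  sorted_dict_obj.foldl
    (fun (acc : List (String × List (List (String × Int))) × Int) kv =>
      let v := kv.2
      let cuts := pvCutsB v
      let m : Int := min 5 ((cuts.length : Int) - 1)
      -- [v[cuts[j]:cuts[j+1]] for j in range(m)]
      let kept := (PySem.List.pyRange 0 m 1).map
        (fun j => PySem.List.slice v (some (PySem.List.pyGetD cuts j 0)) (some (PySem.List.pyGetD cuts (j + 1) 0)))
      -- max([longest_tie] + [cuts[j+1] - cuts[j] for j in range(m)])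
      let gaps := (PySem.List.pyRange 0 m 1).map
        (fun j => PySem.List.pyGetD cuts (j + 1) 0 - PySem.List.pyGetD cuts j 0)
      (acc.1 ++ [(kv.1, kept)],
       match PySem.List.max? (acc.2 :: gaps) (fun y => y) with
       | some z => z
       | none => acc.2))
    ([], -1)

-- ===== PRECONDITION & SPEC =====
-- Pre_ excludes (a) entries with an empty value list, on which A raises IndexError at v[0][1],
-- and (b) association lists with duplicate keys, which cannot arise from the Python dict argument.
def Pre_resolve_tie (sorted_dict_obj : List (String × List (String × Int))) : Prop :=
  (∀ p ∈ sorted_dict_obj, p.2 ≠ []) ∧ (sorted_dict_obj.map (·.1)).Nodup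
instance (sorted_dict_obj : List (String × List (String × Int))) : Decidable (Pre_resolve_tie sorted_dict_obj) := by unfold Pre_resolve_tie; infer_instance

def pvWitness_resolve_tie : (List (String × List (String × Int))) :=
  [("a", [("x", 2), ("y", 2), ("z", 1)]), ("b", [("u", 7)])]

def Spec_resolve_tie (sorted_dict_obj : List (String × List (String × Int))) (out : (List (String × List (List (String × Int)))) × Int) : Prop := out = resolve_tie_alt sorted_dict_obj
instance (sorted_dict_obj : List (String × List (String × Int))) (out : (List (String × List (List (String × Int)))) × Int) : Decidable (Spec_resolve_tie sorted_dict_obj out) := by unfold Spec_resolve_tie; infer_instance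

-- ===== CLAIM (what is proved, stated in full; the proofs are below) =====
def Claim_equal_resolve_tie : Prop := ∀ (sorted_dict_obj : List (String × List (String × Int))), Dom_resolve_tie sorted_dict_obj → Pre_resolve_tie sorted_dict_obj → Spec_resolve_tie sorted_dict_obj (resolve_tie sorted_dict_obj)

-- ===== LEMMAS AND PROOFS =====

-- proof-side: the consecutive-equal-count runs of v (itertools.groupby-style), used only to
-- mediate between A's state machine and B's cut indices
def pvRuns (c : Int) (cur : List (String × Int)) :
    List (String × Int) → List (List (String × Int))
  | [] => [cur]
  | x :: xs => if x.2 == c then pvRuns c (cur ++ [x]) xs else cur :: pvRuns x.2 [x] xs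

def pvGroupRuns : List (String × Int) → List (List (String × Int))
  | [] => []
  | x :: xs => pvRuns x.2 [x] xs

-- proof-side: the start offsets of a list of runs
def pvStarts : Int → List (List (String × Int)) → List Int
  | _, [] => []
  | o, r :: rs => o :: pvStarts (o + r.length) rs

-- proof-side helper: flushing the first min(5 - tc, |runs| - 1) runs, as A's inner loop does
def pvTake5 (k : String) :
    Int → PySem.Dict String (List (List (String × Int))) → Int →
    List (List (String × Int)) →
    PySem.Dict String (List (List (String × Int))) × Int
  | _, d, lg, [] => (d, lg)
  | _, d, lg, [_] => (d, lg)
  | tc, d, lg, r :: s :: rs =>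
    if tc < 5 then
      pvTake5 k (tc + 1) (d.modify k [] (· ++ [r])) (max lg (r.length : Int)) (s :: rs)
    else (d, lg)

theorem pvModify_eq_insert (d : PySem.Dict String (List (List (String × Int)))) (k : String)
    (f : List (List (String × Int)) → List (List (String × Int))) :
    d.modify k [] f = d.insert k (f (d.getD k [])) := PySem.Dict.ext_iff.mpr rfl

theorem pvRuns_ne_nil (c : Int) (cur : List (String × Int)) (l : List (String × Int)) :
    pvRuns c cur l ≠ [] := by
  induction l generalizing c cur with
  | nil => simp [pvRuns]
  | cons x xs ih =>
    simp only [pvRuns]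
    split
    · exact ih _ _
    · simp

theorem pvInnerA_eq_pvTake5 (k : String) (l : List (String × Int)) :
    ∀ (c : Int) (tie : List (String × Int)) (tc : Int)
      (d : PySem.Dict String (List (List (String × Int)))) (lg : Int),
    pvInnerA k l c tie tc d lg = pvTake5 k tc d lg (pvRuns c tie l) := by
  induction l with
  | nil => intro c tie tc d lg; simp [pvInnerA, pvRuns, pvTake5]
  | cons x xs ih =>
    intro c tie tc d lg
    simp only [pvInnerA, pvRuns]
    by_cases h : x.2 == c
    · simp only [h, if_true]
      exact ih c (tie ++ [x]) tc d lg
    · simp only [h, Bool.false_eq_true, if_false]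
      obtain ⟨s, rs, hrs⟩ := List.exists_cons_of_ne_nil (pvRuns_ne_nil x.2 [x] xs)
      rw [hrs]
      have hT : pvTake5 k tc d lg (tie :: s :: rs) =
          if tc < 5 then
            pvTake5 k (tc + 1) (d.modify k [] (· ++ [tie])) (max lg (tie.length : Int)) (s :: rs)
          else (d, lg) := by rw [pvTake5]
      rw [hT]
      split
      · rw [ih x.2 [x] (tc + 1) _ _, hrs]
      · rfl

theorem pvTake5_insert (k : String) (runs : List (List (String × Int)))
    (d : PySem.Dict String (List (List (String × Int)))) :
    ∀ (tc : Int), 0 ≤ tc →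
      ∀ (acc : List (List (String × Int))) (lg : Int),
    pvTake5 k tc (d.insert k acc) lg runs =
      (d.insert k (acc ++ runs.dropLast.take (5 - tc).toNat),
       (runs.dropLast.take (5 - tc).toNat).foldl (fun m g => max m (g.length : Int)) lg) := by
  induction runs with
  | nil => intro tc h0 acc lg; simp [pvTake5]
  | cons r rest ih =>
    intro tc h0 acc lg
    match rest with
    | [] => simp [pvTake5]
    | s :: rs =>
      simp only [pvTake5]
      by_cases h : tc < 5
      · simp only [h, if_true]
        have hmod : (d.insert k acc).modify k [] (· ++ [r]) = d.insert k (acc ++ [r]) := by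
          rw [pvModify_eq_insert, PySem.Dict.getD_insert_self, PySem.Dict.insert_insert_self]
        rw [hmod, ih (tc + 1) (by omega) (acc ++ [r]) (max lg (r.length : Int))]
        have hn : (5 - tc).toNat = (5 - (tc + 1)).toNat + 1 := by omega
        simp [hn, List.append_assoc]
      · have : (5 - tc).toNat = 0 := by omega
        simp [h, this]

-- A's inner loop on one whole value list, started as A starts it, flushes exactly
-- groups[:-1][:5] and folds max over their lengths
theorem pvEntry (k : String) (x : String × Int) (xs : List (String × Int))
    (d : PySem.Dict String (List (List (String × Int)))) (lg : Int) :
    pvInnerA k (x :: xs) x.2 [] 0 (d.insert k []) lg =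
      (d.insert k ((pvGroupRuns (x :: xs)).dropLast.take 5),
       ((pvGroupRuns (x :: xs)).dropLast.take 5).foldl (fun m g => max m (g.length : Int)) lg) := by
  rw [pvInnerA_eq_pvTake5]
  have h1 : pvRuns x.2 [] (x :: xs) = pvGroupRuns (x :: xs) := by
    simp [pvRuns, pvGroupRuns]
  rw [h1, pvTake5_insert k _ d 0 (by omega) [] lg]
  rfl

-- the fold step of port A, and the canonical per-key step both ports are reduced to
def pvAstep (acc : PySem.Dict String (List (List (String × Int))) × Int)
    (kv : String × List (String × Int)) :
    PySem.Dict String (List (List (String × Int))) × Int :=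
  match PySem.List.pyGet? kv.2 0 with
  | none => acc
  | some first => pvInnerA kv.1 kv.2 first.2 [] 0 (acc.1.insert kv.1 []) acc.2

def pvCstep (acc : List (String × List (List (String × Int))) × Int)
    (kv : String × List (String × Int)) :
    List (String × List (List (String × Int))) × Int :=
  let kept := (pvGroupRuns kv.2).dropLast.take 5
  (acc.1 ++ [(kv.1, kept)], kept.foldl (fun m g => max m (g.length : Int)) acc.2)

theorem pvOuter (sdo : List (String × List (String × Int))) :
    ∀ (d : PySem.Dict String (List (List (String × Int)))) (lg : Int),
    (∀ p ∈ sdo, p.2 ≠ []) →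
    (d.keys ++ sdo.map (·.1)).Nodup →
    ((sdo.foldl pvAstep (d, lg)).1.items, (sdo.foldl pvAstep (d, lg)).2) =
      sdo.foldl pvCstep (d.items, lg) := by
  induction sdo with
  | nil => intro d lg _ _; rfl
  | cons kv rest ih =>
    intro d lg hne hnd
    obtain ⟨k, v⟩ := kv
    obtain ⟨x, xs, rfl⟩ := List.exists_cons_of_ne_nil (hne (k, v) (by simp))
    have hmap : ((k, x :: xs) :: rest).map (·.1) = k :: rest.map (·.1) := by simp
    rw [hmap] at hnd
    have hk : k ∉ d.keys := by
      rw [List.nodup_append] at hnd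
      exact fun hh => hnd.2.2 k hh k (by simp) rfl
    have hc : d.contains k = false := by
      rw [Bool.eq_false_iff]
      intro hh
      exact hk ((PySem.Dict.contains_iff_mem_keys _ _).mp hh)
    have hA : pvAstep (d, lg) (k, x :: xs) =
        (d.insert k ((pvGroupRuns (x :: xs)).dropLast.take 5),
         ((pvGroupRuns (x :: xs)).dropLast.take 5).foldl (fun m g => max m (g.length : Int)) lg) := by
      have hg : PySem.List.pyGet? (x :: xs) 0 = some x := by
        simp [PySem.List.pyGet?, PySem.List.pyIdx?]
      simp only [pvAstep, hg]
      exact pvEntry k x xs d lg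
    simp only [List.foldl_cons, hA]
    rw [ih (d.insert k ((pvGroupRuns (x :: xs)).dropLast.take 5)) _
          (fun p hp => hne p (List.mem_cons_of_mem _ hp))
          (by
            rw [PySem.Dict.keys_insert_of_not_contains _ _ hc]
            simpa [List.append_assoc] using hnd)]
    have hit : (d.insert k ((pvGroupRuns (x :: xs)).dropLast.take 5)).items =
        d.items ++ [(k, (pvGroupRuns (x :: xs)).dropLast.take 5)] :=
      PySem.Dict.items_insert_of_not_contains _ _ hc
    rw [hit]
    rfl

-- ===== B side: cuts = run start offsets =====

theorem pvRuns_flatten (l : List (String × Int)) :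
    ∀ (c : Int) (cur : List (String × Int)), (pvRuns c cur l).flatten = cur ++ l := by
  induction l with
  | nil => intro c cur; simp [pvRuns]
  | cons x xs ih =>
    intro c cur
    simp only [pvRuns]
    split
    · rw [ih]; simp
    · simp [ih]

theorem pvStarts_length (rs : List (List (String × Int))) :
    ∀ o, (pvStarts o rs).length = rs.length := by
  induction rs with
  | nil => intro o; rfl
  | cons r rest ih => intro o; simp [pvStarts, ih]

theorem pvStarts_shift (rs : List (List (String × Int))) :
    ∀ (o d : Int), pvStarts (o + d) rs = (pvStarts o rs).map (· + d) := by
  induction rs with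
  | nil => intro o d; rfl
  | cons r rest ih =>
    intro o d
    simp only [pvStarts, List.map_cons]
    congr 1
    rw [show o + d + (r.length : Int) = (o + r.length) + d by ring, ih]

theorem pvStarts_getD (rs : List (List (String × Int))) :
    ∀ (j : Nat), j < rs.length → ∀ (o : Int),
      (pvStarts o rs).getD j 0 = o + ((rs.take j).flatten.length : Int) := by
  induction rs with
  | nil => intro j hj; simp at hj
  | cons r rest ih =>
    intro j hj o
    match j with
    | 0 => simp [pvStarts]
    | j + 1 =>
      simp only [pvStarts, List.getD_cons_succ, List.take_succ_cons, List.flatten_cons,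
        List.length_append]
      rw [ih j (by simpa using hj) (o + r.length)]
      push_cast
      ring

-- indexing (cur ++ w) inside cur reads cur's constant count
theorem pvGetD_const (cur w : List (String × Int)) (c : Int)
    (hc : ∀ p ∈ cur, p.2 = c) (i : Int) (h0 : 0 ≤ i) (hi : i < cur.length) :
    (PySem.List.pyGetD (cur ++ w) i ("", 0)).2 = c := by
  rw [PySem.List.pyGetD_eq_getElem _ _ h0 (by simp; omega)]
  rw [List.getElem_append_left (by omega)]
  exact hc _ (List.getElem_mem _)

-- indexing (cur ++ w) past cur reads w
theorem pvGetD_shift (cur w : List (String × Int)) (j : Nat) (_hj : j < w.length) :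
    PySem.List.pyGetD (cur ++ w) ((cur.length : Int) + j) ("", 0)
      = PySem.List.pyGetD w (j : Int) ("", 0) := by
  have hcast : (cur.length : Int) + j = ((cur.length + j : Nat) : Int) := by push_cast; ring
  rw [hcast, PySem.List.pyGetD_natCast, PySem.List.pyGetD_natCast,
      List.getD_eq_getElem?_getD, List.getD_eq_getElem?_getD,
      List.getElem?_append_right (by omega)]
  congr 2
  omega

-- inside a constant run only index 0 is a boundary
theorem pvFilter_head (cur w : List (String × Int)) (c : Int)
    (h0 : cur ≠ []) (hc : ∀ p ∈ cur, p.2 = c) :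
    (PySem.List.pyRange 0 (cur.length : Int) 1).filter (pvBnd (cur ++ w)) = [0] := by
  have hL : (0 : Int) < cur.length := by
    have := List.length_pos_of_ne_nil h0; omega
  rw [PySem.List.pyRange_one_cons hL]
  rw [List.filter_cons]
  simp only [zero_add]
  have hb0 : pvBnd (cur ++ w) 0 = true := by simp [pvBnd]
  rw [hb0]
  simp only [if_true]
  have : (PySem.List.pyRange 1 (cur.length : Int) 1).filter (pvBnd (cur ++ w)) = [] := by
    rw [List.filter_eq_nil_iff]
    intro i hi
    rw [PySem.List.mem_pyRange_one] at hi
    have hbe : (i == (0 : Int)) = false := by simp; omega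
    simp only [pvBnd, hbe, Bool.false_or, Bool.not_eq_true, bne_eq_false_iff_eq]
    rw [pvGetD_const cur w c hc i (by omega) (by omega),
        pvGetD_const cur w c hc (i - 1) (by omega) (by omega)]
  rw [this]

-- past the run, boundaries of (cur ++ w) are the boundaries of w, shifted
theorem pvFilter_tail (cur : List (String × Int)) (x : String × Int)
    (xs : List (String × Int)) (c : Int)
    (h0 : cur ≠ []) (hc : ∀ p ∈ cur, p.2 = c) (hx : x.2 ≠ c) :
    (PySem.List.pyRange (cur.length : Int) ((cur.length : Int) + ((x :: xs).length : Int)) 1).filter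
        (pvBnd (cur ++ x :: xs))
      = ((PySem.List.pyRange 0 ((x :: xs).length : Int) 1).filter (pvBnd (x :: xs))).map
          (· + (cur.length : Int)) := by
  set w := x :: xs with hw
  set L : Int := (cur.length : Int) with hLdef
  have key : ∀ (k : Nat), k < w.length →
      pvBnd (cur ++ w) (L + (k : Int)) = pvBnd w (k : Int) := by
    intro k hk
    match k with
    | 0 =>
      have hL1 : (1 : Int) ≤ L := by
        have := List.length_pos_of_ne_nil h0; simp [hLdef]; omega
      have hbeL : ((L + ((0 : Nat) : Int)) == (0 : Int)) = false := by simp; omega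
      have hbe0 : (((0 : Nat) : Int) == (0 : Int)) = true := by simp
      simp only [pvBnd, hbeL, hbe0, Bool.false_or, Bool.true_or]
      have h1 : PySem.List.pyGetD (cur ++ w) (L + ((0 : Nat) : Int)) ("", 0)
          = PySem.List.pyGetD w ((0 : Nat) : Int) ("", 0) := pvGetD_shift cur w 0 (by simp [hw])
      have h2 : (PySem.List.pyGetD (cur ++ w) (L + ((0 : Nat) : Int) - 1) ("", 0)).2 = c :=
        pvGetD_const cur w c hc (L + ((0 : Nat) : Int) - 1) (by omega) (by simp [hLdef])
      rw [h1, h2]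
      have : PySem.List.pyGetD w ((0 : Nat) : Int) ("", 0) = x := by
        simp [hw, PySem.List.pyGetD_zero_cons]
      rw [this]
      simp [bne_iff_ne, hx]
    | k + 1 =>
      have hbeL : ((L + ((k + 1 : Nat) : Int)) == (0 : Int)) = false := by simp [hLdef]; omega
      have hbek : (((k + 1 : Nat) : Int) == (0 : Int)) = false := by simp; omega
      simp only [pvBnd, hbeL, hbek, Bool.false_or]
      have e1 : PySem.List.pyGetD (cur ++ w) (L + ((k + 1 : Nat) : Int)) ("", 0)
          = PySem.List.pyGetD w ((k + 1 : Nat) : Int) ("", 0) := pvGetD_shift cur w (k + 1) hk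
      have hidx : L + ((k + 1 : Nat) : Int) - 1 = L + ((k : Nat) : Int) := by push_cast; ring
      have e2 : PySem.List.pyGetD (cur ++ w) (L + ((k + 1 : Nat) : Int) - 1) ("", 0)
          = PySem.List.pyGetD w ((k : Nat) : Int) ("", 0) := by
        rw [hidx]; exact pvGetD_shift cur w k (by omega)
      have hidx2 : ((k + 1 : Nat) : Int) - 1 = ((k : Nat) : Int) := by push_cast; ring
      rw [e1, e2, hidx2]
  have hn : ((L + (w.length : Int)) - L).toNat = w.length := by omega
  have hn2 : (((w.length : Int)) - 0).toNat = w.length := by omega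
  rw [PySem.List.pyRange_one L (L + (w.length : Int)), hn,
      PySem.List.pyRange_one 0 (w.length : Int), hn2]
  simp only [zero_add]
  rw [List.filter_map, List.filter_map, List.map_map]
  have hfe : (List.range w.length).filter ((pvBnd (cur ++ w)) ∘ (fun (k : Nat) => L + (k : Int)))
      = (List.range w.length).filter ((pvBnd w) ∘ (fun (k : Nat) => (k : Int))) := by
    apply List.filter_congr
    intro k hk
    simp only [Function.comp]
    exact key k (by simpa using hk)
  rw [hfe]
  apply List.map_congr_left
  intro k _
  simp only [Function.comp]
  ring

-- A's runs and B's boundary filter describe the same cut positions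
theorem pvRInv (l : List (String × Int)) :
    ∀ (c : Int) (cur : List (String × Int)), cur ≠ [] → (∀ p ∈ cur, p.2 = c) →
    (PySem.List.pyRange 0 (((cur ++ l).length : Int)) 1).filter (pvBnd (cur ++ l))
      = pvStarts 0 (pvRuns c cur l) := by
  induction l with
  | nil =>
    intro c cur h0 hc
    have := pvFilter_head cur [] c h0 hc
    simp only [List.append_nil] at this ⊢
    rw [this]
    rfl
  | cons x xs ih =>
    intro c cur h0 hc
    by_cases h : x.2 = c
    · have hassoc : cur ++ x :: xs = (cur ++ [x]) ++ xs := by simp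
      rw [hassoc, ih c (cur ++ [x]) (by simp) (by
        intro p hp
        rcases List.mem_append.mp hp with hp | hp
        · exact hc p hp
        · simp at hp; subst hp; exact h)]
      simp only [pvRuns, show (x.2 == c) = true by simpa using h, if_true]
    · have hsplit : PySem.List.pyRange 0 (((cur ++ x :: xs).length : Int)) 1
          = PySem.List.pyRange 0 (cur.length : Int) 1
            ++ PySem.List.pyRange (cur.length : Int) ((cur.length : Int) + ((x :: xs).length : Int)) 1 := by
        rw [show (((cur ++ x :: xs).length : Int)) = (cur.length : Int) + ((x :: xs).length : Int) by
          simp]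
        exact PySem.List.pyRange_one_append 0 (cur.length : Int) _ (by omega) (by simp; omega)
      rw [hsplit, List.filter_append, pvFilter_head cur (x :: xs) c h0 hc,
          pvFilter_tail cur x xs c h0 hc h]
      have hih : (PySem.List.pyRange 0 (((x :: xs).length : Int)) 1).filter (pvBnd (x :: xs))
          = pvStarts 0 (pvRuns x.2 [x] xs) := by
        have h2 := ih x.2 [x] (by simp) (by simp)
        simpa using h2
      rw [hih]
      simp only [pvRuns, show (x.2 == c) = false by simpa using h]
      simp only [show (false = true) = False by simp, if_false]
      rw [show pvStarts 0 (cur :: pvRuns x.2 [x] xs)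
            = 0 :: pvStarts (0 + (cur.length : Int)) (pvRuns x.2 [x] xs) from rfl,
          pvStarts_shift]
      rfl

theorem pvCuts_eq_starts (x : String × Int) (xs : List (String × Int)) :
    pvCutsB (x :: xs) = pvStarts 0 (pvGroupRuns (x :: xs)) := by
  have h := pvRInv xs x.2 [x] (by simp) (by simp)
  simpa [pvCutsB, pvGroupRuns] using h

theorem pvDropFlatten (R : List (List (String × Int))) (j : Nat) :
    (R.flatten).drop ((R.take j).flatten.length) = (R.drop j).flatten := by
  rw [show R.flatten = (R.take j).flatten ++ (R.drop j).flatten by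
        rw [← List.flatten_append, List.take_append_drop]]
  exact List.drop_left

theorem pvSliceRun (R : List (List (String × Int))) (j : Nat) (hj : j < R.length) :
    ((R.flatten).drop ((R.take j).flatten.length)).take
        ((R.take (j + 1)).flatten.length - (R.take j).flatten.length) = R[j] := by
  rw [pvDropFlatten]
  have hlen : (R.take (j + 1)).flatten.length - (R.take j).flatten.length = R[j].length := by
    rw [List.take_succ_eq_append_getElem hj, List.flatten_append, List.length_append]
    simp
  rw [hlen, List.drop_eq_getElem_cons hj, List.flatten_cons, List.take_left]

theorem pvCutsIdx (x : String × Int) (xs : List (String × Int)) (j : Nat)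
    (hj : j < (pvGroupRuns (x :: xs)).length) :
    (pvCutsB (x :: xs)).getD j 0 = (((pvGroupRuns (x :: xs)).take j).flatten.length : Int) := by
  rw [pvCuts_eq_starts, pvStarts_getD _ j hj 0, zero_add]

theorem pvCutsLen (x : String × Int) (xs : List (String × Int)) :
    (pvCutsB (x :: xs)).length = (pvGroupRuns (x :: xs)).length := by
  rw [pvCuts_eq_starts, pvStarts_length]

theorem pvGroupRuns_flatten (x : String × Int) (xs : List (String × Int)) :
    (pvGroupRuns (x :: xs)).flatten = x :: xs := by
  have := pvRuns_flatten xs x.2 [x]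
  simpa [pvGroupRuns] using this

theorem pvGroupRuns_ne_nil (x : String × Int) (xs : List (String × Int)) :
    pvGroupRuns (x :: xs) ≠ [] := by
  simpa [pvGroupRuns] using pvRuns_ne_nil x.2 [x] xs

theorem pvMtoNat (x : String × Int) (xs : List (String × Int)) :
    (min 5 (((pvCutsB (x :: xs)).length : Int) - 1)).toNat
      = min 5 ((pvGroupRuns (x :: xs)).length - 1) := by
  have h1 : 0 < (pvGroupRuns (x :: xs)).length :=
    List.length_pos_of_ne_nil (pvGroupRuns_ne_nil x xs)
  rw [pvCutsLen]
  omega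

theorem pvKeptEq (x : String × Int) (xs : List (String × Int)) :
    (PySem.List.pyRange 0 (min 5 (((pvCutsB (x :: xs)).length : Int) - 1)) 1).map
        (fun j => PySem.List.slice (x :: xs)
          (some (PySem.List.pyGetD (pvCutsB (x :: xs)) j 0))
          (some (PySem.List.pyGetD (pvCutsB (x :: xs)) (j + 1) 0)))
      = (pvGroupRuns (x :: xs)).dropLast.take 5 := by
  set R := pvGroupRuns (x :: xs) with hR
  have hlenL : (PySem.List.pyRange 0 (min 5 (((pvCutsB (x :: xs)).length : Int) - 1)) 1).length
      = min 5 (R.length - 1) := by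
    rw [PySem.List.length_pyRange_one]
    simpa using pvMtoNat x xs
  apply List.ext_getElem
  · rw [List.length_map, hlenL]
    simp [List.length_take, List.length_dropLast]
  · intro i h1 h2
    rw [List.length_map, hlenL] at h1
    have hiR : i < R.length - 1 := by omega
    have hi1 : i + 1 < R.length := by omega
    rw [List.getElem_map, PySem.List.getElem_pyRange_one, zero_add]
    have hc1 : PySem.List.pyGetD (pvCutsB (x :: xs)) ((i : Int)) 0
        = (((R.take i).flatten.length : Nat) : Int) := by
      rw [PySem.List.pyGetD_natCast, List.getD_eq_getElem?_getD]
      have := pvCutsIdx x xs i (by rw [← hR]; omega)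
      rw [List.getD_eq_getElem?_getD] at this
      exact this
    have hc2 : PySem.List.pyGetD (pvCutsB (x :: xs)) ((i : Int) + 1) 0
        = (((R.take (i + 1)).flatten.length : Nat) : Int) := by
      rw [show ((i : Int) + 1) = (((i + 1 : Nat)) : Int) by push_cast; ring]
      rw [PySem.List.pyGetD_natCast, List.getD_eq_getElem?_getD]
      have := pvCutsIdx x xs (i + 1) (by rw [← hR]; omega)
      rw [List.getD_eq_getElem?_getD] at this
      exact this
    rw [hc1, hc2, PySem.List.slice_natCast]
    rw [← pvGroupRuns_flatten x xs, ← hR]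
    rw [pvSliceRun R i (by omega)]
    rw [List.getElem_take, List.getElem_dropLast]

theorem pvGapsEq (x : String × Int) (xs : List (String × Int)) :
    (PySem.List.pyRange 0 (min 5 (((pvCutsB (x :: xs)).length : Int) - 1)) 1).map
        (fun j => PySem.List.pyGetD (pvCutsB (x :: xs)) (j + 1) 0
          - PySem.List.pyGetD (pvCutsB (x :: xs)) j 0)
      = ((pvGroupRuns (x :: xs)).dropLast.take 5).map (fun g => (g.length : Int)) := by
  set R := pvGroupRuns (x :: xs) with hR
  have hlenL : (PySem.List.pyRange 0 (min 5 (((pvCutsB (x :: xs)).length : Int) - 1)) 1).length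
      = min 5 (R.length - 1) := by
    rw [PySem.List.length_pyRange_one]
    simpa using pvMtoNat x xs
  apply List.ext_getElem
  · rw [List.length_map, hlenL]
    simp [List.length_take, List.length_dropLast]
  · intro i h1 h2
    rw [List.length_map, hlenL] at h1
    have hiR : i < R.length - 1 := by omega
    have hi1 : i + 1 < R.length := by omega
    rw [List.getElem_map, List.getElem_map, PySem.List.getElem_pyRange_one, zero_add]
    have hc1 : PySem.List.pyGetD (pvCutsB (x :: xs)) ((i : Int)) 0
        = (((R.take i).flatten.length : Nat) : Int) := by
      rw [PySem.List.pyGetD_natCast, List.getD_eq_getElem?_getD]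
      have := pvCutsIdx x xs i (by rw [← hR]; omega)
      rw [List.getD_eq_getElem?_getD] at this
      exact this
    have hc2 : PySem.List.pyGetD (pvCutsB (x :: xs)) ((i : Int) + 1) 0
        = (((R.take (i + 1)).flatten.length : Nat) : Int) := by
      rw [show ((i : Int) + 1) = (((i + 1 : Nat)) : Int) by push_cast; ring]
      rw [PySem.List.pyGetD_natCast, List.getD_eq_getElem?_getD]
      have := pvCutsIdx x xs (i + 1) (by rw [← hR]; omega)
      rw [List.getD_eq_getElem?_getD] at this
      exact this
    rw [hc1, hc2]
    have hstep : (R.take (i + 1)).flatten.length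
        = (R.take i).flatten.length + R[i].length := by
      rw [List.take_succ_eq_append_getElem (by omega), List.flatten_append, List.length_append]
      simp
    rw [List.getElem_take, List.getElem_dropLast]
    omega

theorem resolve_tie_spec : Claim_equal_resolve_tie := by
  intro sdo _ hpre
  unfold Spec_resolve_tie
  show resolve_tie sdo = resolve_tie_alt sdo
  have hB : resolve_tie_alt sdo = sdo.foldl pvCstep ([], -1) := by
    unfold resolve_tie_alt
    apply PySem.List.foldl_congr_mem
    intro acc kv hkv
    obtain ⟨y, ys, hv⟩ := List.exists_cons_of_ne_nil (hpre.1 kv hkv)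
    simp only
    rw [hv, pvKeptEq y ys, pvGapsEq y ys, PySem.List.max?_id_cons]
    simp only [pvCstep, hv]
    rw [List.foldl_map]
  have hA : resolve_tie sdo =
      ((sdo.foldl pvAstep (PySem.Dict.empty, -1)).1.items,
       (sdo.foldl pvAstep (PySem.Dict.empty, -1)).2) := rfl
  rw [hA, hB, pvOuter sdo PySem.Dict.empty (-1) hpre.1 (by simpa using hpre.2)]
  rfl
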